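-- pv_equiv track=rewrite | github.com/ihab65/CryptoGolem | hardusdt.py | group_spike_events
-- ===== SOURCE A (Python) =====
-- def group_spike_events(spike_indices, group_window=96):
--     """Group nearby spike events"""
--     if not spike_indices:
--         return []
--
--     grouped = []
--     current_group = [spike_indices[0]]
--
--     for idx in spike_indices[1:]:
--         if idx - current_group[-1] <= group_window:
--             current_group.append(idx)
--         else:
--             grouped.append(current_group)
--             current_group = [idx]
--
--     grouped.append(current_group)
--     return [min(group) for group in grouped]
-- ===== SOURCE B (Python) =====
-- def group_spike_events(spike_indices, group_window=96):
--     """Group nearby spike events (index-scan version: one pass per group with a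
--     fused running minimum; no intermediate list of group lists is built)."""
--     out = []
--     n = len(spike_indices)
--     i = 0
--     while i < n:
--         m = spike_indices[i]
--         j = i + 1
--         while j < n and spike_indices[j] - spike_indices[j - 1] <= group_window:
--             if spike_indices[j] < m:
--                 m = spike_indices[j]
--             j += 1
--         out.append(m)
--         i = j
--     return out
-- ===== Notes on version B (the rewrite author's own statement) =====
-- stated objective: alternative
-- what changed: Replaces the accumulate-groups-then-map-min two-phase scan (which materialises a list of group lists) by a two-level index scan that emits each group's running minimum directly, using O(1) extra space per group.
import Mathlib
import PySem

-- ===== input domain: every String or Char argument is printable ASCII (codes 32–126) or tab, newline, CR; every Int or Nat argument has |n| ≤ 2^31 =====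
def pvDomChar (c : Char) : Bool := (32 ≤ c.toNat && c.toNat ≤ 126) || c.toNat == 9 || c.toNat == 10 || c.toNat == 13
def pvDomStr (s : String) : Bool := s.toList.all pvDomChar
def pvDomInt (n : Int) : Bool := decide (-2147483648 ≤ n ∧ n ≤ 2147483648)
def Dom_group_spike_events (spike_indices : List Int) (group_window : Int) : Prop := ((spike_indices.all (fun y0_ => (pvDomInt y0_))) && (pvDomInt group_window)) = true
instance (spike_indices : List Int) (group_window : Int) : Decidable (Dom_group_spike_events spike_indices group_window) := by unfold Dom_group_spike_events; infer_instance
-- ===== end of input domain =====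

-- B replaces A's accumulate-groups-then-map-min two-phase scan by a two-level index scan
-- emitting each group's running minimum directly (alternative decomposition, same cost).


-- ===== PORT A =====
-- loop body of A: state = (grouped, current_group); current_group[-1] is its last
-- element (current_group is never empty in any reachable state, so getD 0 is never taken)
def aStep (group_window : Int) (st : List (List Int) × List Int) (idx : Int) :
    List (List Int) × List Int :=
  if idx - (st.2.getLast?.getD 0) ≤ group_window then (st.1, st.2 ++ [idx])
  else (st.1 ++ [st.2], [idx])

def group_spike_events (spike_indices : List Int) (group_window : Int) : List Int :=
  match spike_indices with
  | [] => []
  | x :: rest =>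
    let st := rest.foldl (aStep group_window) (([] : List (List Int)), [x])
    -- grouped.append(current_group); [min(group) for group in grouped]
    (st.1 ++ [st.2]).map (fun g => (PySem.List.min? g (fun y => y)).getD 0)

-- ===== PORT B =====
-- the two while loops of B as one structural recursion: rest = spike_indices[j:],
-- prev = spike_indices[j-1], m = running minimum of the current group
def altGo (group_window : Int) : List Int → Int → Int → List Int
  | [], _, m => [m]
  | x :: xs, prev, m =>
    if x - prev ≤ group_window then altGo group_window xs x (if x < m then x else m)
    else m :: altGo group_window xs x x

def group_spike_events_alt (spike_indices : List Int) (group_window : Int) : List Int :=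
  match spike_indices with
  | [] => []
  | x :: rest => altGo group_window rest x x

-- ===== PRECONDITION & SPEC =====
def Spec_group_spike_events (spike_indices : List Int) (group_window : Int) (out : List Int) : Prop := out = group_spike_events_alt spike_indices group_window
instance (spike_indices : List Int) (group_window : Int) (out : List Int) : Decidable (Spec_group_spike_events spike_indices group_window out) := by unfold Spec_group_spike_events; infer_instance

-- ===== CLAIM (what is proved, stated in full; the proofs are below) =====
def Claim_equal_group_spike_events : Prop := ∀ (spike_indices : List Int) (group_window : Int), Dom_group_spike_events spike_indices group_window → Spec_group_spike_events spike_indices group_window (group_spike_events spike_indices group_window)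

-- ===== LEMMAS AND PROOFS =====
-- min of a nonempty group, as port A computes it
def minD (g : List Int) : Int := (PySem.List.min? g (fun y => y)).getD 0

theorem minD_cons (c : Int) (t : List Int) : minD (c :: t) = t.foldl min c := by
  simp [minD, PySem.List.min?_id_cons]

theorem if_lt_eq_min (a b : Int) : (if b < a then b else a) = min a b := by
  simp only [min_def]; split_ifs <;> omega

-- loop invariant: running A's fold from (grouped, c :: t) and post-processing
-- equals grouped's minima followed by B's scan started at last (c :: t) / min (c :: t)
theorem key (w : Int) : ∀ (rest : List Int) (grouped : List (List Int)) (c : Int) (t : List Int),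
    (((rest.foldl (aStep w) (grouped, c :: t)).1 ++ [(rest.foldl (aStep w) (grouped, c :: t)).2]).map minD)
      = grouped.map minD ++ altGo w rest ((c :: t).getLast?.getD 0) (t.foldl min c) := by
  intro rest
  induction rest with
  | nil =>
    intro grouped c t
    simp [altGo, minD_cons]
  | cons idx r ih =>
    intro grouped c t
    simp only [List.foldl_cons, altGo]
    by_cases h : idx - (c :: t).getLast?.getD 0 ≤ w
    · rw [if_pos h, show aStep w (grouped, c :: t) idx = (grouped, c :: (t ++ [idx])) from if_pos h,
        if_lt_eq_min]
      have hL : (c :: (t ++ [idx])).getLast? = some idx := by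
        rw [← List.cons_append]; exact List.getLast?_concat
      simpa [List.foldl_append, hL] using ih grouped c (t ++ [idx])
    · rw [if_neg h, show aStep w (grouped, c :: t) idx = (grouped ++ [c :: t], [idx]) from if_neg h]
      simpa [minD_cons] using ih (grouped ++ [c :: t]) idx []

-- ===== VERDICT (by name: the statement is the Claim_ definition above) =====
theorem group_spike_events_spec : Claim_equal_group_spike_events := by
  intro spike_indices group_window _
  unfold Spec_group_spike_events
  cases spike_indices with
  | nil => rfl
  | cons x rest =>
    simpa [group_spike_events, group_spike_events_alt]
      using key group_window rest [] x []
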